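-- pv_equiv track=rewrite | github.com/SAAD-Nahri/worker | src/content_engine/formatting.py | _assign_paragraph_chunks
-- ===== SOURCE A (Python) =====
-- def _assign_paragraph_chunks(candidate_paragraphs: list[str], section_count: int) -> list[list[str]]:
--     if section_count <= 0:
--         return []
--
--     normalized_paragraphs = candidate_paragraphs or [""]
--     chunks: list[list[str]] = []
--     start = 0
--     for index in range(section_count):
--         remaining_sections = section_count - index
--         remaining_paragraphs = len(normalized_paragraphs) - start
--         slice_size = max(1, (remaining_paragraphs + remaining_sections - 1) // remaining_sections)
--         end = min(len(normalized_paragraphs), start + slice_size)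
--         chunk = normalized_paragraphs[start:end]
--         chunks.append(chunk or [normalized_paragraphs[-1]])
--         start = end
--
--     fallback_text = normalized_paragraphs[-1]
--     while len(chunks) < section_count:
--         chunks.append([fallback_text])
--     return chunks
-- ===== SOURCE B (Python) =====
-- def _assign_paragraph_chunks(candidate_paragraphs: list[str], section_count: int) -> list[list[str]]:
--     if section_count <= 0:
--         return []
--     normalized = candidate_paragraphs or [""]
--     n = len(normalized)
--     base, extra = divmod(n, section_count)
--     last = normalized[-1]
--
--     def chunk(i: int) -> list[str]:
--         start = i * base + min(i, extra)
--         end = start + base + (1 if i < extra else 0)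
--         return normalized[start:end] or [last]
--
--     return [chunk(i) for i in range(section_count)]
-- ===== Notes on version B (the rewrite author's own statement) =====
-- stated objective: alternative
-- what changed: Replaces A's sequential greedy loop (per-step ceiling division over remaining paragraphs/sections, running start/end pointers, plus a dead padding while-loop) with a single divmod computing base/extra once and a closed-form per-index slice start = i*base + min(i, extra), so each chunk is computed independently with no carried loop state.
import Mathlib
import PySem

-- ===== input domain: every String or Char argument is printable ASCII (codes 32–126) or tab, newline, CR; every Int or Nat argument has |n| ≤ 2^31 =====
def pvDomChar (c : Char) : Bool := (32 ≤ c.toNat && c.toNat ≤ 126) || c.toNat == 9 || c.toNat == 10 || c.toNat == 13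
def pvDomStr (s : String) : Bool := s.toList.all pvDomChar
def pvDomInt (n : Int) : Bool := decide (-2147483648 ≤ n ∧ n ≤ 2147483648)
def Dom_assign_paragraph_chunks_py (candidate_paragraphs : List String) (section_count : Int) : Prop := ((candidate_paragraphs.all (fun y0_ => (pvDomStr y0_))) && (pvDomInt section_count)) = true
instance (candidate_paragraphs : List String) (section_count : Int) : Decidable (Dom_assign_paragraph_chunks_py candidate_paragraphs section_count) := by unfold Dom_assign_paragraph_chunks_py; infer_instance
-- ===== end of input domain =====

-- B replaces A's greedy per-step ceiling loop by one divmod and closed-form per-index slice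
-- boundaries (alternative decomposition, same cost); return values proved equal on all inputs.

-- ===== PORT A =====
-- the trailing 'while len(chunks) < section_count' padding loop of A, transliterated
def pyPadWhile (section_count : Int) (fallback : String) (chunks : List (List String)) : List (List String) :=
  if (chunks.length : Int) < section_count then
    pyPadWhile section_count fallback (chunks ++ [[fallback]])
  else chunks
termination_by (section_count - chunks.length).toNat
decreasing_by simp; omega

def assign_paragraph_chunks_py (candidate_paragraphs : List String) (section_count : Int) : List (List String) :=
  if section_count ≤ 0 then [] else
  let normalized := if candidate_paragraphs = [] then [""] else candidate_paragraphs
  let st := (PySem.List.pyRange 0 section_count 1).foldl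
    (fun (st : List (List String) × Int) index =>
      let chunks := st.1
      let start := st.2
      let remaining_sections := section_count - index
      let remaining_paragraphs := (normalized.length : Int) - start
      let slice_size := max 1 (PySem.Int.floordiv (remaining_paragraphs + remaining_sections - 1) remaining_sections)
      let endi := min (normalized.length : Int) (start + slice_size)
      let chunk := PySem.List.slice normalized (some start) (some endi)
      (chunks ++ [if chunk = [] then [PySem.List.pyGetD normalized (-1) ""] else chunk], endi))
    ([], 0)
  let fallback := PySem.List.pyGetD normalized (-1) ""
  pyPadWhile section_count fallback st.1

-- ===== PORT B =====
def assign_paragraph_chunks_py_alt (candidate_paragraphs : List String) (section_count : Int) : List (List String) :=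
  if section_count ≤ 0 then [] else
  let normalized := if candidate_paragraphs = [] then [""] else candidate_paragraphs
  let n : Int := normalized.length
  let be := (PySem.Int.divmod? n section_count).getD (0, 0)
  let base := be.1
  let extra := be.2
  let last := PySem.List.pyGetD normalized (-1) ""
  (PySem.List.pyRange 0 section_count 1).map (fun i =>
    let start := i * base + min i extra
    let endi := start + base + (if i < extra then 1 else 0)
    let chunk := PySem.List.slice normalized (some start) (some endi)
    if chunk = [] then [last] else chunk)

-- ===== PRECONDITION & SPEC =====
def Spec_assign_paragraph_chunks_py (candidate_paragraphs : List String) (section_count : Int) (out : List (List String)) : Prop := out = assign_paragraph_chunks_py_alt candidate_paragraphs section_count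
instance (candidate_paragraphs : List String) (section_count : Int) (out : List (List String)) : Decidable (Spec_assign_paragraph_chunks_py candidate_paragraphs section_count out) := by unfold Spec_assign_paragraph_chunks_py; infer_instance

-- ===== CLAIM (what is proved, stated in full; the proofs are below) =====
def Claim_equal_assign_paragraph_chunks_py : Prop := ∀ (candidate_paragraphs : List String) (section_count : Int), Dom_assign_paragraph_chunks_py candidate_paragraphs section_count → Spec_assign_paragraph_chunks_py candidate_paragraphs section_count (assign_paragraph_chunks_py candidate_paragraphs section_count)

-- ===== LEMMAS AND PROOFS =====

-- proof helper: the literal body of A's fold, named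
def Abody (normalized : List String) (sc : Int) (st : List (List String) × Int) (index : Int) : List (List String) × Int :=
  let chunks := st.1
  let start := st.2
  let remaining_sections := sc - index
  let remaining_paragraphs := (normalized.length : Int) - start
  let slice_size := max 1 (PySem.Int.floordiv (remaining_paragraphs + remaining_sections - 1) remaining_sections)
  let endi := min (normalized.length : Int) (start + slice_size)
  let chunk := PySem.List.slice normalized (some start) (some endi)
  (chunks ++ [if chunk = [] then [PySem.List.pyGetD normalized (-1) ""] else chunk], endi)

-- proof helper: the literal chunk of B at index i
def Bchunk (normalized : List String) (extra base i : Int) : List String :=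
  let start := i * base + min i extra
  let endi := start + base + (if i < extra then 1 else 0)
  let chunk := PySem.List.slice normalized (some start) (some endi)
  if chunk = [] then [PySem.List.pyGetD normalized (-1) ""] else chunk

lemma fdiv_decomp (q r t : Int) (hr : 0 < r) (ht0 : 0 ≤ t) (ht1 : t < r) :
    PySem.Int.floordiv (q * r + t) r = q := by
  rw [PySem.Int.floordiv_eq_iff_of_pos hr]
  constructor <;> nlinarith

lemma f_succ (base extra i : Int) :
    (i + 1) * base + min (i + 1) extra = i * base + min i extra + base + (if i < extra then 1 else 0) := by
  rcases lt_or_ge i extra with h' | h'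
  · rw [if_pos h', min_eq_left h'.le, min_eq_left (by omega)]; ring
  · rw [if_neg (not_lt.2 h'), min_eq_right h', min_eq_right (by omega)]; ring

lemma step_endi (n sc base extra i : Int)
    (hb : n = base * sc + extra) (he1 : extra < sc)
    (hb0 : 0 ≤ base) (hi1 : i < sc) :
    min n (i * base + min i extra +
      max 1 (PySem.Int.floordiv (n - (i * base + min i extra) + (sc - i) - 1) (sc - i)))
      = i * base + min i extra + base + (if i < extra then 1 else 0) := by
  have hr : 0 < sc - i := by omega
  rcases lt_or_ge i extra with h | h
  · rw [min_eq_left h.le]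
    have h1 : n - (i * base + i) + (sc - i) - 1 = (base + 1) * (sc - i) + (extra - i - 1) := by
      rw [hb]; ring
    rw [h1, fdiv_decomp _ _ _ hr (by omega) (by omega),
        max_eq_right (by omega), if_pos h,
        min_eq_right (by nlinarith [mul_nonneg hb0 (show (0:Int) ≤ sc - i - 1 by omega)])]
    ring
  · rw [min_eq_right h]
    have h1 : n - (i * base + extra) + (sc - i) - 1 = base * (sc - i) + ((sc - i) - 1) := by
      rw [hb]; ring
    rw [h1, fdiv_decomp _ _ _ hr (by omega) (by omega), if_neg (not_lt.2 h)]
    rcases eq_or_lt_of_le hb0 with hb1 | hb1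
    · have hne : n = extra := by rw [hb, ← hb1]; ring
      rw [← hb1]
      simp
      omega
    · rw [max_eq_right (by omega),
          min_eq_right (by nlinarith [mul_nonneg hb0 (show (0:Int) ≤ sc - i - 1 by omega)])]
      ring

lemma loop_eq (normalized : List String) (sc base extra : Int) (hsc : 0 < sc)
    (hb : (normalized.length : Int) = base * sc + extra) (he1 : extra < sc)
    (hb0 : 0 ≤ base) :
    ∀ (j : Nat) (i : Int), i = sc - j → 0 ≤ i → ∀ acc : List (List String),
    (PySem.List.pyRange i sc 1).foldl (Abody normalized sc)
        (acc, i * base + min i extra)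
    = (acc ++ (PySem.List.pyRange i sc 1).map (Bchunk normalized extra base),
       sc * base + min sc extra) := by
  intro j
  induction j with
  | zero =>
    intro i hi hi0 acc
    have : i = sc := by omega
    subst this
    rw [PySem.List.pyRange_one_eq_nil (le_refl _)]
    simp
  | succ j ih =>
    intro i hi hi0 acc
    by_cases hlt : i < sc
    · rw [PySem.List.pyRange_one_cons hlt]
      simp only [List.foldl_cons, List.map_cons]
      have hbody : Abody normalized sc (acc, i * base + min i extra) i
          = (acc ++ [Bchunk normalized extra base i], (i + 1) * base + min (i + 1) extra) := by
        show (acc ++ [_], _) = _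
        rw [Prod.mk.injEq]
        constructor
        · simp only [Bchunk]
          rw [step_endi _ sc base extra i hb he1 hb0 hlt]
        · rw [step_endi _ sc base extra i hb he1 hb0 hlt,
              f_succ base extra i]
      rw [hbody, ih (i + 1) (by omega) (by omega) (acc ++ [Bchunk normalized extra base i])]
      simp
    · have : i = sc := by omega
      subst this
      rw [PySem.List.pyRange_one_eq_nil (le_refl _)]
      simp

-- ===== VERDICT (by name: the statement is the Claim_ definition above) =====
theorem assign_paragraph_chunks_py_spec : Claim_equal_assign_paragraph_chunks_py := by
  intro cp sc _hdom
  unfold Spec_assign_paragraph_chunks_py assign_paragraph_chunks_py assign_paragraph_chunks_py_alt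
  by_cases hsc : sc ≤ 0
  · simp [hsc]
  · simp only [if_neg hsc]
    have hsc' : 0 < sc := by omega
    set normalized := if cp = [] then [""] else cp with hnorm
    set n : Int := (normalized.length : Int) with hn
    set base := PySem.Int.floordiv n sc with hbase
    set extra := PySem.Int.mod n sc with hextra
    have hdm : (PySem.Int.divmod? n sc).getD (0, 0) = (base, extra) := by
      have hsc0 : ¬ sc = 0 := by omega
      simp only [PySem.Int.divmod?, if_neg hsc0, Option.getD_some, hbase, hextra,
        PySem.Int.floordiv, PySem.Int.mod]
    have hn0 : 0 ≤ n := by positivity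
    have hb : n = base * sc + extra := by
      have := PySem.Int.floordiv_mul_add_mod n sc
      rw [← hbase, ← hextra] at this
      omega
    have he0 : 0 ≤ extra := by
      rw [hextra, PySem.Int.mod_eq_emod_of_pos hsc']
      exact Int.emod_nonneg n (by omega)
    have he1 : extra < sc := by
      rw [hextra, PySem.Int.mod_eq_emod_of_pos hsc']
      exact Int.emod_lt_of_pos n hsc'
    have hb0 : 0 ≤ base := by
      rw [hbase, PySem.Int.floordiv_eq_ediv_of_pos hsc']
      exact Int.ediv_nonneg hn0 (by omega)
    have hfold :
        (PySem.List.pyRange 0 sc 1).foldl (Abody normalized sc) ([], 0)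
        = ((PySem.List.pyRange 0 sc 1).map (Bchunk normalized extra base),
           sc * base + min sc extra) := by
      have := loop_eq normalized sc base extra hsc' hb he1 hb0 sc.toNat 0 (by omega) (le_refl 0) []
      simpa [min_eq_left he0, -List.length_eq_zero_iff] using this
    rw [hdm]
    show pyPadWhile sc (PySem.List.pyGetD normalized (-1) "")
        (List.foldl (Abody normalized sc) ([], 0) (PySem.List.pyRange 0 sc 1)).1
      = List.map (Bchunk normalized extra base) (PySem.List.pyRange 0 sc 1)
    rw [hfold]
    rw [pyPadWhile]
    simp only [List.length_map, PySem.List.length_pyRange_one]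
    split_ifs with hcond
    · exfalso; omega
    · rfl
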